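-- pv_equiv track=rewrite | github.com/Y-T04KA/ML | work4_24_3.py | n_counter
-- ===== SOURCE A (Python) =====
-- def n_counter(ci, cj):
--     n11 = 0
--     n10 = 0
--     n01 = 0
--     n00 = 0
--     for vi in range(len(ci)):
--         if (ci[vi] == cj[vi]) and (ci[vi] == 1):
--             n11 += 1
--         elif (ci[vi] == cj[vi]) and (ci[vi] == 0):
--             n00 += 1
--         elif ci[vi] > cj[vi]:
--             n10 += 1
--         elif ci[vi] < cj[vi]:
--             n01 += 1
--     return n11, n10, n01, n00
-- ===== SOURCE B (Python) =====
-- def n_counter(ci, cj):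
--     pairs = [(ci[i], cj[i]) for i in range(len(ci))]
--     n11 = pairs.count((1, 1))
--     n00 = pairs.count((0, 0))
--     n10 = sum(1 for a, b in pairs if a > b)
--     n01 = sum(1 for a, b in pairs if a < b)
--     return n11, n10, n01, n00
-- ===== Notes on version B (the rewrite author's own statement) =====
-- stated objective: simpler
-- what changed: Replaces the single loop with a 4-way if/elif branch and four running accumulators by tabulate-then-classify: build the list of (ci[i], cj[i]) pairs once, then obtain each cell by a direct count (count((1,1)), count((0,0)), count of a>b, count of a<b).
import Mathlib
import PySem

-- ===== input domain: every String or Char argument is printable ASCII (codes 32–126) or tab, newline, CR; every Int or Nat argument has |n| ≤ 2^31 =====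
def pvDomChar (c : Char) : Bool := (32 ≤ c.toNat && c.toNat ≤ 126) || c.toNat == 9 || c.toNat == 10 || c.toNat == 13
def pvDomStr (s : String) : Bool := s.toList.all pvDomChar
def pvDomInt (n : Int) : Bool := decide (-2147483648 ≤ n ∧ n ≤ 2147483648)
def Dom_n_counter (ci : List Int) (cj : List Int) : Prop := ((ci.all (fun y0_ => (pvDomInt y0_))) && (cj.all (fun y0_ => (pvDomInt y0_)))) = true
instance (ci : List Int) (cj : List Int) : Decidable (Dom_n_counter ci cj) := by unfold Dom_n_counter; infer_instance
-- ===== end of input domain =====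

-- B replaces A's single loop with a 4-way branch by tabulate-then-classify (pair list, then four direct counts);
-- objective: simpler. Equality of the RETURN value is proved for len ci ≤ len cj (otherwise both raise IndexError).

-- ===== PORT A =====
-- A: one loop over range(len(ci)), 4-way if/elif updating four accumulators (n11, n10, n01, n00).
def n_counter (ci : List Int) (cj : List Int) : Int × Int × Int × Int :=
  let s := (PySem.List.pyRange 0 ci.length 1).foldl
    (fun (s : Int × Int × Int × Int) vi =>
      let a := PySem.List.pyGetD ci vi 0   -- ci[vi]; in range under Pre_
      let b := PySem.List.pyGetD cj vi 0   -- cj[vi]; in range under Pre_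
      if a = b ∧ a = 1 then (s.1 + 1, s.2.1, s.2.2.1, s.2.2.2)
      else if a = b ∧ a = 0 then (s.1, s.2.1, s.2.2.1, s.2.2.2 + 1)
      else if a > b then (s.1, s.2.1 + 1, s.2.2.1, s.2.2.2)
      else if a < b then (s.1, s.2.1, s.2.2.1 + 1, s.2.2.2)
      else s)
    (0, 0, 0, 0)
  (s.1, s.2.1, s.2.2.1, s.2.2.2)

-- ===== PORT B =====
-- B: build the pair list [(ci[i], cj[i]) for i in range(len(ci))], then four direct counts.
def n_counter_alt (ci : List Int) (cj : List Int) : Int × Int × Int × Int :=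
  let pairs := (PySem.List.pyRange 0 ci.length 1).map
    (fun i => (PySem.List.pyGetD ci i 0, PySem.List.pyGetD cj i 0))  -- in range under Pre_
  let n11 : Int := PySem.List.count pairs (1, 1)
  let n00 : Int := PySem.List.count pairs (0, 0)
  let n10 : Int := pairs.countP (fun p => decide (p.1 > p.2))  -- sum(1 for a,b in pairs if a > b)
  let n01 : Int := pairs.countP (fun p => decide (p.1 < p.2))  -- sum(1 for a,b in pairs if a < b)
  (n11, n10, n01, n00)

-- ===== PRECONDITION & SPEC =====
-- A indexes cj[vi] for every vi < len(ci), so it raises IndexError iff len(cj) < len(ci); exactly those inputs are excluded.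
def Pre_n_counter (ci : List Int) (cj : List Int) : Prop := ci.length ≤ cj.length
instance (ci : List Int) (cj : List Int) : Decidable (Pre_n_counter ci cj) := by unfold Pre_n_counter; infer_instance
def pvWitness_n_counter : List Int × List Int := ([1, 0, 2, 0], [1, 1, 0, 0])

def Spec_n_counter (ci : List Int) (cj : List Int) (out : Int × Int × Int × Int) : Prop := out = n_counter_alt ci cj
instance (ci : List Int) (cj : List Int) (out : Int × Int × Int × Int) : Decidable (Spec_n_counter ci cj out) := by unfold Spec_n_counter; infer_instance

-- ===== CLAIM (what is proved, stated in full; the proofs are below) =====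
def Claim_equal_n_counter : Prop := ∀ (ci : List Int) (cj : List Int), Dom_n_counter ci cj → Pre_n_counter ci cj → Spec_n_counter ci cj (n_counter ci cj)

-- ===== LEMMAS AND PROOFS =====

-- A's loop over any index list L, started at any state s, adds exactly the four counts of the classified pairs.
theorem n_counter_fold_eq_counts (f : Int → Int × Int) (L : List Int) (s : Int × Int × Int × Int) :
    L.foldl
      (fun (s : Int × Int × Int × Int) vi =>
        let a := (f vi).1
        let b := (f vi).2
        if a = b ∧ a = 1 then (s.1 + 1, s.2.1, s.2.2.1, s.2.2.2)
        else if a = b ∧ a = 0 then (s.1, s.2.1, s.2.2.1, s.2.2.2 + 1)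
        else if a > b then (s.1, s.2.1 + 1, s.2.2.1, s.2.2.2)
        else if a < b then (s.1, s.2.1, s.2.2.1 + 1, s.2.2.2)
        else s) s
    = (s.1 + (PySem.List.count (L.map f) (1, 1) : Int),
       s.2.1 + ((L.map f).countP (fun p => decide (p.1 > p.2)) : Int),
       s.2.2.1 + ((L.map f).countP (fun p => decide (p.1 < p.2)) : Int),
       s.2.2.2 + (PySem.List.count (L.map f) (0, 0) : Int)) := by
  induction L generalizing s with
  | nil => simp [PySem.List.count]
  | cons l t ih =>
    simp only [List.foldl_cons, List.map_cons]
    rw [ih]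
    rcases hfl : f l with ⟨a, b⟩
    simp only [PySem.List.count_eq, List.count_cons, List.countP_cons, Prod.mk.injEq]
    split_ifs <;>
      simp only [beq_iff_eq, Prod.mk.injEq, decide_eq_true_eq, gt_iff_lt] at * <;>
      push_cast <;> omega

-- ===== VERDICT (by name: the statement is the Claim_ definition above) =====
theorem n_counter_spec : Claim_equal_n_counter := by
  intro ci cj _ _
  unfold Spec_n_counter n_counter n_counter_alt
  rw [show ((PySem.List.pyRange 0 ci.length 1).foldl
      (fun (s : Int × Int × Int × Int) vi =>
        let a := PySem.List.pyGetD ci vi 0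
        let b := PySem.List.pyGetD cj vi 0
        if a = b ∧ a = 1 then (s.1 + 1, s.2.1, s.2.2.1, s.2.2.2)
        else if a = b ∧ a = 0 then (s.1, s.2.1, s.2.2.1, s.2.2.2 + 1)
        else if a > b then (s.1, s.2.1 + 1, s.2.2.1, s.2.2.2)
        else if a < b then (s.1, s.2.1, s.2.2.1 + 1, s.2.2.2)
        else s) (0, 0, 0, 0))
    = ((PySem.List.pyRange 0 ci.length 1).foldl
      (fun (s : Int × Int × Int × Int) vi =>
        let a := ((fun i => (PySem.List.pyGetD ci i 0, PySem.List.pyGetD cj i 0)) vi).1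
        let b := ((fun i => (PySem.List.pyGetD ci i 0, PySem.List.pyGetD cj i 0)) vi).2
        if a = b ∧ a = 1 then (s.1 + 1, s.2.1, s.2.2.1, s.2.2.2)
        else if a = b ∧ a = 0 then (s.1, s.2.1, s.2.2.1, s.2.2.2 + 1)
        else if a > b then (s.1, s.2.1 + 1, s.2.2.1, s.2.2.2)
        else if a < b then (s.1, s.2.1, s.2.2.1 + 1, s.2.2.2)
        else s) (0, 0, 0, 0)) from rfl,
    n_counter_fold_eq_counts]
  simp
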